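-- pv_equiv track=rewrite | github.com/Pramod-Potti-Krishnan/text-labs | backend/services/text_box_generator.py | _distribute_items
-- ===== SOURCE A (Python) =====
-- from typing import List, Optional
--
-- def _distribute_items(
--
--     items: List[str],
--     box_count: int,
--     items_per_box: int
-- ) -> List[List[str]]:
--     """Distribute items evenly across boxes."""
--     if not items:
--         # Generate placeholder items
--         items = [f"Item {i + 1}" for i in range(box_count * items_per_box)]
--
--     result = []
--     items_iter = iter(items)
--
--     for _ in range(box_count):
--         box_items = []
--         for _ in range(items_per_box):
--             try:
--                 box_items.append(next(items_iter))
--             except StopIteration: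
--                 break
--         result.append(box_items)
--
--     return result
-- ===== SOURCE B (Python) =====
-- def _distribute_items(items, box_count, items_per_box):
--     """Distribute items evenly across boxes: one pass over the items, grouping
--     them into chunks, instead of A's counted nested loops over an iterator."""
--     if not items:
--         # Generate placeholder items
--         items = [f"Item {i + 1}" for i in range(box_count * items_per_box)]
--
--     boxes = []
--     if items_per_box > 0 and box_count > 0:
--         cur = []
--         for item in items:
--             cur.append(item)
--             if len(cur) == items_per_box:
--                 boxes.append(cur)
--                 cur = []
--                 if len(boxes) == box_count:
--                     break
--         if cur and len(boxes) < box_count: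
--             boxes.append(cur)
--     boxes += [[] for _ in range(box_count - len(boxes))]
--     return boxes
-- ===== Notes on version B (the rewrite author's own statement) =====
-- stated objective: alternative
-- what changed: Replaces A's counted nested loops pulling from an iterator with StopIteration handling by a single pass over the items that groups them into boxes (with an early stop at box_count) and then pads with empty boxes.
import Mathlib
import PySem

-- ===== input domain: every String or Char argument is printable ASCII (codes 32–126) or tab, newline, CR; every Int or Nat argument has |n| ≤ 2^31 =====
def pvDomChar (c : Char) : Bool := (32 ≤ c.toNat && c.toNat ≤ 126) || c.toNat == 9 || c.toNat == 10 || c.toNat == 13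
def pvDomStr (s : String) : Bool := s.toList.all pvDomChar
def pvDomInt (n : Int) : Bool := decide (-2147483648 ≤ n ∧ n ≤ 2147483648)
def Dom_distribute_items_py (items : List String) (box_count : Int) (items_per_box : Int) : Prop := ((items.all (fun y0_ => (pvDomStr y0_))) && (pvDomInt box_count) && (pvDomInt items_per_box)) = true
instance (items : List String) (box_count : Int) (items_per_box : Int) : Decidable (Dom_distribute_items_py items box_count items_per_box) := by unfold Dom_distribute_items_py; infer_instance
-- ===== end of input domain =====

-- B replaces A's counted nested loops over an iterator (with StopIteration) by a single pass over the items that groups them into boxes and pads with empty boxes (alternative decomposition, same cost).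


-- ===== PORT A =====
-- inner loop: 'for _ in range(items_per_box): try: box_items.append(next(items_iter)) except StopIteration: break'
-- the iterator state is the list of not-yet-consumed items; returns (box_items, remaining items)
def pvTakeNext : Nat → List String → (List String × List String)
  | 0, rest => ([], rest)
  | _ + 1, [] => ([], [])            -- StopIteration: break
  | n + 1, x :: rest =>
      let p := pvTakeNext n rest
      (x :: p.1, p.2)

-- outer loop: 'for _ in range(box_count): …; result.append(box_items)'
def pvOuter : Nat → Nat → List String → List (List String)
  | 0, _, _ => []
  | n + 1, ipb, rest =>
      let p := pvTakeNext ipb rest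
      p.1 :: pvOuter n ipb p.2

def distribute_items_py (items : List String) (box_count : Int) (items_per_box : Int) : List (List String) :=
  let items := if items = [] then
      (PySem.List.pyRange 0 (box_count * items_per_box) 1).map (fun i => "Item " ++ PySem.Int.toStr (i + 1))
    else items
  pvOuter box_count.toNat items_per_box.toNat items

-- ===== PORT B =====
-- 'for item in items: cur.append(item); if len(cur) == items_per_box: boxes.append(cur); cur = []; if len(boxes) == box_count: break'
-- boxes/cur are accumulated in reverse (cons) and reversed where Python appends/returns them;
-- nb/nc carry len(boxes)/len(cur), porting Python's O(1) len; returns (boxes reversed, len(boxes), cur reversed)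
def pvLoopB (k bc : Nat) : List (List String) → Nat → List String → Nat → List String → (List (List String) × Nat × List String)
  | boxesRev, nb, curRev, _, [] => (boxesRev, nb, curRev)
  | boxesRev, nb, curRev, nc, x :: rest =>
      if nc + 1 = k then
        if nb + 1 = bc then ((x :: curRev).reverse :: boxesRev, nb + 1, [])
        else pvLoopB k bc ((x :: curRev).reverse :: boxesRev) (nb + 1) [] 0 rest
      else pvLoopB k bc boxesRev nb (x :: curRev) (nc + 1) rest

def distribute_items_py_alt (items : List String) (box_count : Int) (items_per_box : Int) : List (List String) :=
  let items := if items = [] then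
      (PySem.List.pyRange 0 (box_count * items_per_box) 1).map (fun i => "Item " ++ PySem.Int.toStr (i + 1))
    else items
  let boxes : List (List String) :=
    if 0 < items_per_box ∧ 0 < box_count then
      let r := pvLoopB items_per_box.toNat box_count.toNat [] 0 [] 0 items
      let bx := if r.2.2 ≠ [] ∧ ((r.2.1 : Int) < box_count) then r.2.2.reverse :: r.1 else r.1
      bx.reverse
    else []
  boxes ++ List.replicate ((box_count - (boxes.length : Int)).toNat) []

-- ===== PRECONDITION & SPEC =====
def Spec_distribute_items_py (items : List String) (box_count : Int) (items_per_box : Int) (out : List (List String)) : Prop := out = distribute_items_py_alt items box_count items_per_box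
instance (items : List String) (box_count : Int) (items_per_box : Int) (out : List (List String)) : Decidable (Spec_distribute_items_py items box_count items_per_box out) := by unfold Spec_distribute_items_py; infer_instance

-- ===== CLAIM (what is proved, stated in full; the proofs are below) =====
def Claim_equal_distribute_items_py : Prop := ∀ (items : List String) (box_count : Int) (items_per_box : Int), Dom_distribute_items_py items box_count items_per_box → Spec_distribute_items_py items box_count items_per_box (distribute_items_py items box_count items_per_box)

-- ===== LEMMAS AND PROOFS =====

lemma takeNext_eq (n : Nat) (xs : List String) :
    pvTakeNext n xs = (xs.take n, xs.drop n) := by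
  induction n generalizing xs with
  | zero => simp [pvTakeNext]
  | succ n ih =>
    cases xs with
    | nil => simp [pvTakeNext]
    | cons a t => simp [pvTakeNext, ih]

lemma outer_succ (n k : Nat) (xs : List String) :
    pvOuter (n + 1) k xs = xs.take k :: pvOuter n k (xs.drop k) := by
  simp [pvOuter, takeNext_eq]

lemma outer_nil (n k : Nat) : pvOuter n k [] = List.replicate n [] := by
  induction n with
  | zero => simp [pvOuter]
  | succ n ih => simp [outer_succ, ih, List.replicate_succ]

lemma outer_zero (n : Nat) (xs : List String) : pvOuter n 0 xs = List.replicate n [] := by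
  induction n generalizing xs with
  | zero => simp [pvOuter]
  | succ n ih => simp [outer_succ, ih, List.replicate_succ]

-- the single-pass loop of B, finalised (partial box appended, reversed, padded), equals A's per-box chunking
lemma loopB_inv (k bc : Nat) (hk : 0 < k) (xs : List String) :
    ∀ (curRev : List String) (boxesRev : List (List String)),
      curRev.length < k → boxesRev.length < bc →
      (let r := pvLoopB k bc boxesRev boxesRev.length curRev curRev.length xs
       let bx := if r.2.2 ≠ [] ∧ r.2.1 < bc then r.2.2.reverse :: r.1 else r.1
       bx.reverse ++ List.replicate (bc - bx.length) [])
      = boxesRev.reverse ++ pvOuter (bc - boxesRev.length) k (curRev.reverse ++ xs) := by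
  induction xs with
  | nil =>
    intro curRev boxesRev hnc hnb
    simp only [pvLoopB]
    by_cases hcur : curRev = []
    · subst hcur
      simp [outer_nil, hnb]
    · have hm : ∃ m, bc - boxesRev.length = m + 1 := ⟨bc - boxesRev.length - 1, by omega⟩
      obtain ⟨m, hm⟩ := hm
      simp only [hcur, hnb, and_true, ne_eq, not_false_iff, if_true, hm, outer_succ]
      rw [List.take_of_length_le (by simpa using hnc.le), List.drop_of_length_le (by simpa using hnc.le)]
      simp [outer_nil]
      omega
  | cons x rest ih =>
    intro curRev boxesRev hnc hnb
    simp only [pvLoopB]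
    by_cases hfull : curRev.length + 1 = k
    · have hsplit : curRev.reverse ++ x :: rest = ((x :: curRev).reverse) ++ rest := by simp
      have hlen : ((x :: curRev).reverse).length = k := by simpa using hfull
      by_cases hlast : boxesRev.length + 1 = bc
      · simp only [hfull, if_true, hlast, if_true]
        have hm : bc - boxesRev.length = 1 := by omega
        simp only [ne_eq, not_true_eq_false, false_and, if_false, hm, outer_succ, hsplit]
        rw [← hlen, List.take_left, List.drop_left]
        simp [pvOuter]
        omega
      · simp only [hfull, if_true, hlast, if_false]
        have ih' := ih [] (((x :: curRev).reverse) :: boxesRev) (by simpa using hk) (by simp; omega)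
        simp only [List.length_cons, List.length_nil] at ih'
        rw [ih']
        have hm : ∃ m, bc - boxesRev.length = m + 1 := ⟨bc - boxesRev.length - 1, by omega⟩
        obtain ⟨m, hm⟩ := hm
        rw [hm, outer_succ, hsplit, ← hlen, List.take_left, List.drop_left]
        have : bc - (boxesRev.length + 1) = m := by omega
        simp [this]
    · simp only [hfull, if_false]
      have ih' := ih (x :: curRev) boxesRev (by simp; omega) hnb
      simp only [List.length_cons] at ih'
      rw [ih']
      simp

-- ===== VERDICT (by name: the statement is the Claim_ definition above) =====
theorem distribute_items_py_spec : Claim_equal_distribute_items_py := by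
  intro items bc ipb _
  unfold Spec_distribute_items_py distribute_items_py distribute_items_py_alt
  simp only []
  set xs := (if items = [] then
      (PySem.List.pyRange 0 (bc * ipb) 1).map (fun i => "Item " ++ PySem.Int.toStr (i + 1))
    else items) with hxs
  by_cases hpos : 0 < ipb ∧ 0 < bc
  · rw [if_pos hpos]
    have hk : 0 < ipb.toNat := by omega
    have hbc0 : 0 < bc.toNat := by omega
    have hinv := loopB_inv ipb.toNat bc.toNat hk xs [] [] (by simpa using hk) (by simpa using hbc0)
    simp only [List.length_nil, List.reverse_nil, List.nil_append, Nat.sub_zero] at hinv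
    set r := pvLoopB ipb.toNat bc.toNat [] 0 [] 0 xs with hr
    have hcond : (r.2.2 ≠ [] ∧ ((r.2.1 : Int) < bc)) = (r.2.2 ≠ [] ∧ r.2.1 < bc.toNat) := by
      apply propext
      constructor <;> rintro ⟨h1, h2⟩ <;> exact ⟨h1, by omega⟩
    simp only [hcond]
    set bx := (if r.2.2 ≠ [] ∧ r.2.1 < bc.toNat then r.2.2.reverse :: r.1 else r.1) with hbx
    rw [List.length_reverse]
    rw [show ((bc - (bx.length : Int)).toNat) = bc.toNat - bx.length from by omega]
    exact hinv.symm
  · rw [if_neg hpos]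
    simp only [List.nil_append, List.length_nil, Nat.cast_zero, sub_zero]
    rcases (not_and_or.mp hpos) with h | h
    · have h0 : ipb.toNat = 0 := by omega
      rw [h0, outer_zero]
    · have h0 : bc.toNat = 0 := by omega
      rw [h0]
      simp [pvOuter]
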